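-- pv_equiv track=rewrite | github.com/Axelvel/AICup | date.py | month_assumption
-- ===== SOURCE A (Python) =====
-- def month_assumption(date, raw):
--     total_date = []
--     total_raw = []
--     for file,raw_strings in zip(date, raw):
--         first = []
--         second = []
--         file_date = []
--         file_raw=[]
--
--         for item in file:
--             splitted = item.split("-")
--             if len(splitted) != 3:
--                 continue
--             first.append(splitted[0])
--             second.append(splitted[1])
--
--         n_max_first = 0
--         n_max_second = 0
--
--         for fnumber,snumber in zip(first,second):
--             if first.count(fnumber) > n_max_first:
--                 n_max_first = first.count(fnumber)
--
--             if second.count(snumber) > n_max_second: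
--                 n_max_second = second.count(snumber)
--
--         if n_max_first>n_max_second and n_max_first >1:
--             for item, raw_string in zip(file, raw_strings):
--                 splitted = item.split("-")
--                 file_date.append(f"{splitted[1]}/{splitted[0]}/{splitted[2]}")
--                 file_raw.append(raw_string)
--
--
--         elif n_max_first < n_max_second and n_max_second>1:
--             for item, raw_string in zip(file, raw_strings):
--                 file_date.append(item.replace("-","/"))
--                 file_raw.append(raw_string)
--
--         else:
--             for item, raw_string in zip(file, raw_strings):
--                 file_date.append(item)
--                 file_raw.append(raw_string)
--         total_date.append(file_date)
--         total_raw.append(file_raw)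
--
--
--     return(total_date,total_raw)
-- ===== SOURCE B (Python) =====
-- def _mode(values):
--     # partition-based mode: repeatedly strip all occurrences of the head,
--     # measuring its multiplicity by the length drop; no counting scans.
--     best = 0
--     while values:
--         v = values[0]
--         rest = [x for x in values if x != v]
--         best = max(best, len(values) - len(rest))
--         values = rest
--     return best
--
--
-- def _reorder_file(file, raw_strings):
--     triples = [item.split("-") for item in file]
--     n1 = _mode([t[0] for t in triples if len(t) == 3])
--     n2 = _mode([t[1] for t in triples if len(t) == 3])
--     k = min(len(file), len(raw_strings))
--     items = file[:k]
--     if n1 > n2 and n1 > 1: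
--         file_date = [t[1] + "/" + t[0] + "/" + t[2]
--                      for t in (it.split("-") for it in items)]
--     elif n1 < n2 and n2 > 1:
--         file_date = [it.replace("-", "/") for it in items]
--     else:
--         file_date = list(items)
--     return file_date, raw_strings[:k]
--
--
-- def month_assumption(date, raw):
--     pairs = [_reorder_file(f, r) for f, r in zip(date, raw)]
--     return [p[0] for p in pairs], [p[1] for p in pairs]
-- ===== Notes on version B (the rewrite author's own statement) =====
-- stated objective: alternative
-- what changed: B finds each file's dominant date component by a partition loop (repeatedly strip all occurrences of the head value and read its multiplicity off the length drop) instead of A's nested list.count scans over the zipped component lists, and builds the reordered outputs with slice-based comprehensions per file instead of A's paired append loops.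
import Mathlib
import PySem

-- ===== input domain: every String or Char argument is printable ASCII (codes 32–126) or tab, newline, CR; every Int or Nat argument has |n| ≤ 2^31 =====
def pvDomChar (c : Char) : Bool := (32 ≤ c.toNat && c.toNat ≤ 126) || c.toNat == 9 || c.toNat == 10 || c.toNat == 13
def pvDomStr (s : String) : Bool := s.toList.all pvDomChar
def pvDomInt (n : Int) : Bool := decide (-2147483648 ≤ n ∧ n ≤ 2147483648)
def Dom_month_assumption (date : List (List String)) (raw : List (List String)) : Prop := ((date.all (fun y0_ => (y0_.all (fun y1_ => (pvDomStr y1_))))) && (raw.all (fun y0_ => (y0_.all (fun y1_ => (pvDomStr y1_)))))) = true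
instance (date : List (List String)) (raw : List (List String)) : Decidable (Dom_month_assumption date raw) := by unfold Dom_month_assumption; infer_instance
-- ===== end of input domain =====

-- B finds the dominant date component by a partition loop (strip all occurrences of the head,
-- read the multiplicity off the length drop) instead of A's repeated list.count scans, and builds
-- the outputs by slice-based comprehensions (objective: alternative; neither program mutates its arguments).

-- s.split("-") — exact: split? is none only for an empty separator
def pvSplit (s : String) : List String := (PySem.Str.split? s "-").getD []

-- ===== PORT A =====
def month_assumption (date : List (List String)) (raw : List (List String)) : List (List String) × List (List String) :=
  (date.zip raw).foldl (fun (tot : List (List String) × List (List String)) fr =>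
    let file := fr.1
    let raws := fr.2
    let fs := file.foldl (fun (p : List String × List String) item =>
        let sp := pvSplit item
        if sp.length ≠ 3 then p
        else (p.1 ++ [(PySem.List.pyGet? sp 0).getD ""], p.2 ++ [(PySem.List.pyGet? sp 1).getD ""])) ([], [])
    let first := fs.1
    let second := fs.2
    let ns : Int × Int := (first.zip second).foldl (fun (n : Int × Int) q =>
        (if ((List.count q.1 first : Int)) > n.1 then (List.count q.1 first : Int) else n.1,
         if ((List.count q.2 second : Int)) > n.2 then (List.count q.2 second : Int) else n.2)) (0, 0)
    let fdfr :=
      if ns.1 > ns.2 ∧ ns.1 > 1 then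
        (file.zip raws).foldl (fun (p : List String × List String) q =>
          let sp := pvSplit q.1
          (p.1 ++ [(PySem.List.pyGet? sp 1).getD "" ++ "/" ++ (PySem.List.pyGet? sp 0).getD "" ++ "/" ++ (PySem.List.pyGet? sp 2).getD ""],
           p.2 ++ [q.2])) ([], [])
      else if ns.1 < ns.2 ∧ ns.2 > 1 then
        (file.zip raws).foldl (fun (p : List String × List String) q =>
          (p.1 ++ [PySem.Str.replace q.1 "-" "/"], p.2 ++ [q.2])) ([], [])
      else
        (file.zip raws).foldl (fun (p : List String × List String) q =>
          (p.1 ++ [q.1], p.2 ++ [q.2])) ([], [])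
    (tot.1 ++ [fdfr.1], tot.2 ++ [fdfr.2])) ([], [])

-- ===== PORT B =====
-- best = 0; while values: v = values[0]; rest = [x for x in values if x != v];
--           best = max(best, len(values) - len(rest)); values = rest
def pvModeLoop (values : List String) (best : Int) : Int :=
  match values with
  | [] => best
  | v :: t =>
      let rest := (v :: t).filter (fun x => x ≠ v)
      pvModeLoop rest (max best ((((v :: t).length : Int)) - rest.length))
termination_by values.length
decreasing_by
  simp only [List.filter_cons, ne_eq, decide_not]
  simp
  exact List.length_filter_le _ t

def pvMode (values : List String) : Int := pvModeLoop values 0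

def pvReorderFile (file : List String) (raws : List String) : List String × List String :=
  let triples := file.map (fun it => pvSplit it)
  let n1 := pvMode ((triples.filter (fun t => t.length == 3)).map (fun t => (PySem.List.pyGet? t 0).getD ""))
  let n2 := pvMode ((triples.filter (fun t => t.length == 3)).map (fun t => (PySem.List.pyGet? t 1).getD ""))
  let k := min file.length raws.length
  let items := file.take k
  let fd :=
    if n1 > n2 ∧ n1 > 1 then
      (items.map (fun it => pvSplit it)).map (fun t =>
        (PySem.List.pyGet? t 1).getD "" ++ "/" ++ (PySem.List.pyGet? t 0).getD "" ++ "/" ++ (PySem.List.pyGet? t 2).getD "")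
    else if n1 < n2 ∧ n2 > 1 then
      items.map (fun it => PySem.Str.replace it "-" "/")
    else
      items
  (fd, raws.take k)

def month_assumption_alt (date : List (List String)) (raw : List (List String)) : List (List String) × List (List String) :=
  let pairs := (date.zip raw).map (fun p => pvReorderFile p.1 p.2)
  (pairs.map (fun p => p.1), pairs.map (fun p => p.2))

-- ===== PRECONDITION & SPEC =====
-- helper for Pre_ only: the i-th date components of a file, as both programs collect them
def pvComps (file : List String) (i : Int) : List String :=
  ((file.map (fun it => pvSplit it)).filter (fun t => t.length == 3)).map
    (fun t => (PySem.List.pyGet? t i).getD "")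

-- Pre_ excludes exactly the inputs on which A raises IndexError (B raises there too): a file whose
-- reorder branch is taken (some first component of count ≥ 2 strictly dominating every
-- second-component count) while some item zipped with a raw string has fewer than two "-".
def Pre_month_assumption (date : List (List String)) (raw : List (List String)) : Prop :=
  ∀ p ∈ date.zip raw,
    (∃ x ∈ pvComps p.1 0, 2 ≤ List.count x (pvComps p.1 0) ∧
        ∀ y ∈ pvComps p.1 1, List.count y (pvComps p.1 1) < List.count x (pvComps p.1 0)) →
      ∀ it ∈ p.1.take p.2.length, 2 ≤ PySem.Str.count it "-"
instance (date : List (List String)) (raw : List (List String)) : Decidable (Pre_month_assumption date raw) := by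
  unfold Pre_month_assumption; infer_instance

def pvWitness_month_assumption : List (List String) × List (List String) :=
  ([["3-4-2021", "3-5-2021"], ["1-2", "x"]], [["a", "b"], ["d"]])

def Spec_month_assumption (date : List (List String)) (raw : List (List String)) (out : List (List String) × List (List String)) : Prop := out = month_assumption_alt date raw
instance (date : List (List String)) (raw : List (List String)) (out : List (List String) × List (List String)) : Decidable (Spec_month_assumption date raw out) := by unfold Spec_month_assumption; infer_instance

-- ===== CLAIM (what is proved, stated in full; the proofs are below) =====
def Claim_equal_month_assumption : Prop := ∀ (date : List (List String)) (raw : List (List String)), Dom_month_assumption date raw → Pre_month_assumption date raw → Spec_month_assumption date raw (month_assumption date raw)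

-- ===== LEMMAS AND PROOFS =====

-- the paired append-loop shape, closed to a pair of maps
theorem pv_foldl_pair_append {α β γ : Type} (l : List α) (f : α → β) (g : α → γ)
    (a : List β) (b : List γ) :
    l.foldl (fun p q => (p.1 ++ [f q], p.2 ++ [g q])) (a, b) = (a ++ l.map f, b ++ l.map g) := by
  induction l generalizing a b with
  | nil => simp
  | cons x t ih => simp [List.foldl_cons, ih]

-- the skip-on-condition paired append loop, closed to filter + map
theorem pv_foldl_pair_filter {α β γ : Type} (l : List α) (c : α → Prop) [DecidablePred c]
    (f : α → β) (g : α → γ) (a : List β) (b : List γ) :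
    l.foldl (fun p q => if c q then p else (p.1 ++ [f q], p.2 ++ [g q])) (a, b)
      = (a ++ (l.filter (fun q => decide ¬ c q)).map f, b ++ (l.filter (fun q => decide ¬ c q)).map g) := by
  induction l generalizing a b with
  | nil => simp
  | cons x t ih => by_cases h : c x <;> simp [List.foldl_cons, ih, h]

-- a componentwise fold over a zip of equal-length lists splits into two folds
theorem pv_foldl_zip_pair {α β : Type} (l1 : List α) (l2 : List β)
    (f : Int → α → Int) (g : Int → β → Int) (a b : Int) (h : l1.length = l2.length) :
    (l1.zip l2).foldl (fun n q => (f n.1 q.1, g n.2 q.2)) (a, b) = (l1.foldl f a, l2.foldl g b) := by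
  induction l1 generalizing l2 a b with
  | nil => cases l2 <;> simp_all
  | cons x t ih =>
    cases l2 with
    | nil => simp at h
    | cons y t2 =>
      simp only [List.zip_cons_cons, List.foldl_cons]
      exact ih t2 _ _ (by simpa using h)

theorem pv_zip_map_fst {α β γ : Type} (l1 : List α) (l2 : List β) (h : α → γ) :
    (l1.zip l2).map (fun q => h q.1) = (l1.take (min l1.length l2.length)).map h := by
  induction l1 generalizing l2 with
  | nil => simp
  | cons x t ih =>
    cases l2 with
    | nil => simp
    | cons y t2 => simp [Nat.succ_min_succ, ih]

theorem pv_zip_map_snd {α β : Type} (l1 : List α) (l2 : List β) :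
    (l1.zip l2).map (fun q => q.2) = l2.take (min l1.length l2.length) := by
  induction l1 generalizing l2 with
  | nil => simp
  | cons x t ih =>
    cases l2 with
    | nil => simp
    | cons y t2 => simp [Nat.succ_min_succ, ih]

-- the running-max loop: lower bounds and attainment
theorem pv_foldl_max_le {α : Type} (l : List α) (f : α → Int) (a : Int) :
    a ≤ l.foldl (fun n x => if f x > n then f x else n) a := by
  induction l generalizing a with
  | nil => simp
  | cons x t ih =>
    refine le_trans ?_ (ih (if f x > a then f x else a))
    split <;> omega

theorem pv_foldl_max_mem_le {α : Type} (l : List α) (f : α → Int) (a : Int)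
    (z : α) (hz : z ∈ l) :
    f z ≤ l.foldl (fun n x => if f x > n then f x else n) a := by
  induction l generalizing a with
  | nil => simp at hz
  | cons y t ih =>
    simp only [List.foldl_cons]
    rcases List.mem_cons.mp hz with h | h
    · subst h
      refine le_trans ?_ (pv_foldl_max_le t f _)
      split <;> omega
    · exact ih _ h

theorem pv_foldl_max_cases {α : Type} (l : List α) (f : α → Int) (a : Int) :
    l.foldl (fun n x => if f x > n then f x else n) a = a ∨
      ∃ x ∈ l, l.foldl (fun n x => if f x > n then f x else n) a = f x := by
  induction l generalizing a with
  | nil => simp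
  | cons y t ih =>
    simp only [List.foldl_cons]
    by_cases hc : f y > a
    · rw [if_pos hc]
      rcases ih (f y) with h | ⟨x, hx, h⟩
      · exact Or.inr ⟨y, List.mem_cons_self, h⟩
      · exact Or.inr ⟨x, List.mem_cons_of_mem _ hx, h⟩
    · rw [if_neg hc]
      rcases ih a with h | ⟨x, hx, h⟩
      · exact Or.inl h
      · exact Or.inr ⟨x, List.mem_cons_of_mem _ hx, h⟩

-- the length drop when stripping all occurrences of v equals v's count
theorem pv_strip_count (l : List String) (v : String) :
    ((l.length : Int)) - (l.filter (fun x => x ≠ v)).length = List.count v l := by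
  have h : (l.filter (fun x => x ≠ v)).length + List.count v l = l.length := by
    induction l with
    | nil => simp
    | cons y t ih =>
      simp only [List.filter_cons, List.count_cons, List.length_cons, ne_eq, decide_not] at ih ⊢
      by_cases hy : y = v
      · simp [hy]; omega
      · simp [hy]; omega
  omega

-- B's partition loop: lower bounds and attainment (mirrors the three facts about A's running max)
theorem pvModeLoop_ge (l : List String) (b : Int) : b ≤ pvModeLoop l b := by
  induction l, b using pvModeLoop.induct with
  | case1 => simp [pvModeLoop]
  | case2 b v t rest ih =>
    rw [pvModeLoop]
    refine le_trans ?_ ih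
    exact le_max_left _ _

theorem pvModeLoop_count_le_aux (n : Nat) : ∀ (l : List String), l.length ≤ n →
    ∀ (b : Int) (z : String), z ∈ l → (List.count z l : Int) ≤ pvModeLoop l b := by
  induction n with
  | zero =>
    intro l hl b z hz
    cases l with
    | nil => simp at hz
    | cons v t => simp at hl
  | succ n ih =>
    intro l hl b z hz
    cases l with
    | nil => simp at hz
    | cons v t =>
      rw [pvModeLoop]
      have hrl : ((v :: t).filter (fun x => x ≠ v)).length ≤ n := by
        have h1 : ((v :: t).filter (fun x => x ≠ v)).length ≤ t.length := by
          simp only [List.filter_cons, ne_eq, decide_not]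
          simp
          exact List.length_filter_le _ t
        simp only [List.length_cons] at hl
        omega
      by_cases h : z = v
      · subst h
        have h1 := pvModeLoop_ge ((z :: t).filter (fun x => x ≠ z))
          (max b ((((z :: t).length : Int)) - ((z :: t).filter (fun x => x ≠ z)).length))
        have h2 := pv_strip_count (z :: t) z
        have h3 : (((z :: t).length : Int)) - ((z :: t).filter (fun x => x ≠ z)).length
            ≤ max b ((((z :: t).length : Int)) - ((z :: t).filter (fun x => x ≠ z)).length) :=
          le_max_right _ _
        omega
      · have hzr : z ∈ ((v :: t).filter (fun x => x ≠ v)) := by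
          rw [List.mem_filter]
          exact ⟨hz, by simp [h]⟩
        have hcr : List.count z ((v :: t).filter (fun x => x ≠ v)) = List.count z (v :: t) := by
          rw [List.count_filter]
          simp [h]
        have := ih _ hrl (max b ((((v :: t).length : Int)) - ((v :: t).filter (fun x => x ≠ v)).length)) z hzr
        rw [hcr] at this
        exact this

theorem pvModeLoop_cases_aux (n : Nat) : ∀ (l : List String), l.length ≤ n → ∀ (b : Int),
    pvModeLoop l b = b ∨ ∃ x ∈ l, pvModeLoop l b = List.count x l := by
  induction n with
  | zero =>
    intro l hl b
    cases l with
    | nil => simp [pvModeLoop]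
    | cons v t => simp at hl
  | succ n ih =>
    intro l hl b
    cases l with
    | nil => simp [pvModeLoop]
    | cons v t =>
      rw [pvModeLoop]
      have hrl : ((v :: t).filter (fun x => x ≠ v)).length ≤ n := by
        have h1 : ((v :: t).filter (fun x => x ≠ v)).length ≤ t.length := by
          simp only [List.filter_cons, ne_eq, decide_not]
          simp
          exact List.length_filter_le _ t
        simp only [List.length_cons] at hl
        omega
      rcases ih _ hrl (max b ((((v :: t).length : Int)) - ((v :: t).filter (fun x => x ≠ v)).length)) with h | ⟨x, hx, h⟩
      · by_cases hb : b ≤ (((v :: t).length : Int)) - ((v :: t).filter (fun x => x ≠ v)).length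
        · right
          refine ⟨v, List.mem_cons_self, ?_⟩
          rw [h, max_eq_right hb, pv_strip_count]
        · left
          rw [h, max_eq_left (by omega)]
      · right
        have hxl : x ∈ v :: t := List.mem_of_mem_filter hx
        have hxv : x ≠ v := by
          have := (List.mem_filter.mp hx).2
          simpa using this
        have hcr : List.count x ((v :: t).filter (fun x => x ≠ v)) = List.count x (v :: t) := by
          rw [List.count_filter]
          simp [hxv]
        exact ⟨x, hxl, by rw [h, hcr]⟩

theorem pvModeLoop_count_le (l : List String) (b : Int) (z : String) (hz : z ∈ l) :
    (List.count z l : Int) ≤ pvModeLoop l b :=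
  pvModeLoop_count_le_aux l.length l le_rfl b z hz

theorem pvModeLoop_cases (l : List String) (b : Int) :
    pvModeLoop l b = b ∨ ∃ x ∈ l, pvModeLoop l b = List.count x l :=
  pvModeLoop_cases_aux l.length l le_rfl b

-- A's quadratic running max of counts equals B's partition-loop mode count
theorem pv_mode_eq (l : List String) :
    l.foldl (fun n x => if ((List.count x l : Int)) > n then (List.count x l : Int) else n) 0
      = pvMode l := by
  unfold pvMode
  apply le_antisymm
  · rcases pv_foldl_max_cases l (fun x => (List.count x l : Int)) 0 with h | ⟨x, hx, h⟩
    · rw [h]; exact pvModeLoop_ge l 0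
    · rw [h]; exact pvModeLoop_count_le l 0 x hx
  · rcases pvModeLoop_cases l 0 with h | ⟨x, hx, h⟩
    · rw [h]; exact pv_foldl_max_le l _ 0
    · rw [h]; exact pv_foldl_max_mem_le l (fun x => (List.count x l : Int)) 0 x hx

-- the two programs collect the same component lists
theorem pv_comps_eq (file : List String) (i : Int) :
    (file.filter (fun q => decide ¬ ((pvSplit q).length ≠ 3))).map
        (fun q => (PySem.List.pyGet? (pvSplit q) i).getD "")
      = ((file.map (fun it => pvSplit it)).filter (fun t => t.length == 3)).map
          (fun t => (PySem.List.pyGet? t i).getD "") := by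
  rw [List.filter_map, List.map_map]
  congr 1
  apply List.filter_congr
  intro a _
  rw [Bool.eq_iff_iff]
  simp

-- the running max over the zip of the two equal-length component lists, componentwise
theorem pv_ns_eq (first second : List String) (h : first.length = second.length) :
    (first.zip second).foldl (fun (n : Int × Int) q =>
        (if ((List.count q.1 first : Int)) > n.1 then (List.count q.1 first : Int) else n.1,
         if ((List.count q.2 second : Int)) > n.2 then (List.count q.2 second : Int) else n.2)) (0, 0)
      = (pvMode first, pvMode second) := by
  rw [pv_foldl_zip_pair first second
      (fun n x => if ((List.count x first : Int)) > n then (List.count x first : Int) else n)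
      (fun n x => if ((List.count x second : Int)) > n then (List.count x second : Int) else n) 0 0 h]
  rw [pv_mode_eq, pv_mode_eq]

-- A's per-file body, as a named helper (used only by the proofs below)
def pvFileA (file raws : List String) : List String × List String :=
  let fs := file.foldl (fun (p : List String × List String) item =>
      let sp := pvSplit item
      if sp.length ≠ 3 then p
      else (p.1 ++ [(PySem.List.pyGet? sp 0).getD ""], p.2 ++ [(PySem.List.pyGet? sp 1).getD ""])) ([], [])
  let first := fs.1
  let second := fs.2
  let ns : Int × Int := (first.zip second).foldl (fun (n : Int × Int) q =>
      (if ((List.count q.1 first : Int)) > n.1 then (List.count q.1 first : Int) else n.1,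
       if ((List.count q.2 second : Int)) > n.2 then (List.count q.2 second : Int) else n.2)) (0, 0)
  if ns.1 > ns.2 ∧ ns.1 > 1 then
    (file.zip raws).foldl (fun (p : List String × List String) q =>
      let sp := pvSplit q.1
      (p.1 ++ [(PySem.List.pyGet? sp 1).getD "" ++ "/" ++ (PySem.List.pyGet? sp 0).getD "" ++ "/" ++ (PySem.List.pyGet? sp 2).getD ""],
       p.2 ++ [q.2])) ([], [])
  else if ns.1 < ns.2 ∧ ns.2 > 1 then
    (file.zip raws).foldl (fun (p : List String × List String) q =>
      (p.1 ++ [PySem.Str.replace q.1 "-" "/"], p.2 ++ [q.2])) ([], [])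
  else
    (file.zip raws).foldl (fun (p : List String × List String) q =>
      (p.1 ++ [q.1], p.2 ++ [q.2])) ([], [])

-- the per-file bodies agree
theorem pv_perfile (file raws : List String) :
    pvFileA file raws = pvReorderFile file raws := by
  simp only [pvFileA, pvReorderFile]
  rw [show (fun (p : List String × List String) item =>
        let sp := pvSplit item
        if sp.length ≠ 3 then p
        else (p.1 ++ [(PySem.List.pyGet? sp 0).getD ""], p.2 ++ [(PySem.List.pyGet? sp 1).getD ""]))
      = (fun (p : List String × List String) q =>
        if (pvSplit q).length ≠ 3 then p
        else (p.1 ++ [(fun s => (PySem.List.pyGet? (pvSplit s) 0).getD "") q],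
              p.2 ++ [(fun s => (PySem.List.pyGet? (pvSplit s) 1).getD "") q])) from rfl]
  rw [pv_foldl_pair_filter file (fun q => (pvSplit q).length ≠ 3)
      (fun s => (PySem.List.pyGet? (pvSplit s) 0).getD "")
      (fun s => (PySem.List.pyGet? (pvSplit s) 1).getD "") [] []]
  simp only [List.nil_append]
  rw [pv_ns_eq _ _ (by simp)]
  rw [pv_comps_eq file 0, pv_comps_eq file 1]
  dsimp only
  split_ifs with h1 h2
  · rw [show (fun (p : List String × List String) (q : String × String) =>
        let sp := pvSplit q.1
        (p.1 ++ [(PySem.List.pyGet? sp 1).getD "" ++ "/" ++ (PySem.List.pyGet? sp 0).getD "" ++ "/" ++ (PySem.List.pyGet? sp 2).getD ""],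
         p.2 ++ [q.2]))
      = (fun (p : List String × List String) (q : String × String) =>
        (p.1 ++ [(fun s => (PySem.List.pyGet? (pvSplit s) 1).getD "" ++ "/" ++ (PySem.List.pyGet? (pvSplit s) 0).getD "" ++ "/" ++ (PySem.List.pyGet? (pvSplit s) 2).getD "") q.1],
         p.2 ++ [(fun r => r) q.2])) from rfl]
    rw [pv_foldl_pair_append]
    simp only [List.nil_append]
    rw [pv_zip_map_fst file raws (fun s => (PySem.List.pyGet? (pvSplit s) 1).getD "" ++ "/" ++ (PySem.List.pyGet? (pvSplit s) 0).getD "" ++ "/" ++ (PySem.List.pyGet? (pvSplit s) 2).getD ""),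
        pv_zip_map_snd file raws, List.map_map]
    rfl
  · rw [show (fun (p : List String × List String) (q : String × String) =>
        (p.1 ++ [PySem.Str.replace q.1 "-" "/"], p.2 ++ [q.2]))
      = (fun (p : List String × List String) (q : String × String) =>
        (p.1 ++ [(fun s => PySem.Str.replace s "-" "/") q.1], p.2 ++ [(fun r => r) q.2])) from rfl]
    rw [pv_foldl_pair_append]
    simp only [List.nil_append]
    rw [pv_zip_map_fst file raws (fun s => PySem.Str.replace s "-" "/"), pv_zip_map_snd file raws]
  · rw [show (fun (p : List String × List String) (q : String × String) =>
        (p.1 ++ [q.1], p.2 ++ [q.2]))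
      = (fun (p : List String × List String) (q : String × String) =>
        (p.1 ++ [(fun s => s) q.1], p.2 ++ [(fun r => r) q.2])) from rfl]
    rw [pv_foldl_pair_append]
    simp only [List.nil_append]
    rw [pv_zip_map_fst file raws (fun s => s), pv_zip_map_snd file raws, List.map_id']

-- ===== VERDICT (by name: the statement is the Claim_ definition above) =====
theorem month_assumption_spec : Claim_equal_month_assumption := by
  intro date raw _ _
  show (date.zip raw).foldl
      (fun tot fr => (tot.1 ++ [(pvFileA fr.1 fr.2).1], tot.2 ++ [(pvFileA fr.1 fr.2).2])) ([], [])
    = month_assumption_alt date raw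
  rw [pv_foldl_pair_append ((date.zip raw))
      (fun fr => (pvFileA fr.1 fr.2).1) (fun fr => (pvFileA fr.1 fr.2).2) [] []]
  unfold month_assumption_alt
  simp only [List.nil_append, List.map_map]
  refine Prod.ext ?_ ?_ <;>
    exact List.map_congr_left fun q _ => by simp [Function.comp_apply, pv_perfile]
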